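-- pv_equiv track=rewrite | github.com/Ibrahim170105/Frequent-Itemset-Mining | src/apriori_optimized.py | build_tidlists
-- ===== SOURCE A (Python) =====
-- def build_tidlists(transactions):
--     """
--     Build TID (Transaction ID) lists for each item.
--
--     Args:
--         transactions (list): List of frozensets representing transactions.
--
--     Returns:
--         dict: Dictionary where keys are item IDs and values are sets of transaction IDs
--               containing that item.
--     """
--     tidlists = {}
--
--     for tid, transaction in enumerate(transactions):
--
--         for item in transaction:
--
--             if item not in tidlists:
--                 tidlists[item] = set()
--
--             tidlists[item].add(tid)
--
--     return tidlists
-- ===== SOURCE B (Python) =====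
-- def build_tidlists(transactions):
--     # Per-item decomposition: collect the distinct items first, then for each
--     # item scan the enumerated transactions once to collect its tids.
--     items = dict.fromkeys(item for t in transactions for item in t)
--     return {item: {tid for tid, t in enumerate(transactions) if item in t}
--             for item in items}
-- ===== Notes on version B (the rewrite author's own statement) =====
-- stated objective: alternative
-- what changed: Replaces the incremental dict-of-sets built while streaming transactions by a two-phase per-item decomposition: first collect the distinct items (dict.fromkeys over the flattened transactions), then build each item's tid set by one comprehension scan over the enumerated transactions.
import Mathlib
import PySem

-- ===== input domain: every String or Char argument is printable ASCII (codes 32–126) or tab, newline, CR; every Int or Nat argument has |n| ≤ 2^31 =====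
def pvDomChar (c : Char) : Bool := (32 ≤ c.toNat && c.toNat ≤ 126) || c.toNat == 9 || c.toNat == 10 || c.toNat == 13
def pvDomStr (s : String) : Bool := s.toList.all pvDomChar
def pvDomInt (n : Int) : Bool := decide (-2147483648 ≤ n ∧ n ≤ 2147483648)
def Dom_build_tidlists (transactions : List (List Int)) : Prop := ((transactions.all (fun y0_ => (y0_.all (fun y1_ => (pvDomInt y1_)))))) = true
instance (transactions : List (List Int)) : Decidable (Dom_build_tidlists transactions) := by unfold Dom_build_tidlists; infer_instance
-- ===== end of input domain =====

-- B replaces A's incremental dict-of-sets streaming pass by a two-phase per-item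
-- decomposition (distinct items first, then one scan per item); objective: alternative.


-- ===== PORT A =====
-- for tid, transaction in enumerate(transactions): for item in transaction:
--   if item not in tidlists: tidlists[item] = set()    (-> setdefault item ∅)
--   tidlists[item].add(tid)                            (-> modify item (·.add tid))
def build_tidlists (transactions : List (List Int)) : List (Int × List Int) :=
  ((PySem.List.enumerate transactions 0).foldl
    (fun d p =>
      p.2.foldl
        (fun (d : PySem.Dict Int (PySem.Set Int)) item =>
          (d.setdefault item PySem.Set.empty).modify item PySem.Set.empty
            (fun s => PySem.Set.add s p.1))
        d)
    PySem.Dict.empty).items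

-- ===== PORT B =====
-- items = dict.fromkeys(flattened transactions); per item, the set comprehension
-- {tid for tid, t in enumerate(transactions) if item in t}
def build_tidlists_alt (transactions : List (List Int)) : List (Int × List Int) :=
  (PySem.List.dedup transactions.flatten).map
    (fun item =>
      (item, PySem.Set.ofList
        (((PySem.List.enumerate transactions 0).filter
            (fun p => p.2.contains item)).map (·.1))))

-- ===== PRECONDITION & SPEC =====
def Spec_build_tidlists (transactions : List (List Int)) (out : List (Int × List Int)) : Prop := out = build_tidlists_alt transactions
instance (transactions : List (List Int)) (out : List (Int × List Int)) : Decidable (Spec_build_tidlists transactions out) := by unfold Spec_build_tidlists; infer_instance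

-- ===== CLAIM (what is proved, stated in full; the proofs are below) =====
def Claim_equal_build_tidlists : Prop := ∀ (transactions : List (List Int)), Dom_build_tidlists transactions → Spec_build_tidlists transactions (build_tidlists transactions)


-- ===== LEMMAS AND PROOFS =====

-- one step of the inner loop: keys gain the item (set-add), value at the item gains tid
theorem pv_step_keys (d : PySem.Dict Int (PySem.Set Int)) (x tid : Int) :
    ((d.setdefault x PySem.Set.empty).modify x PySem.Set.empty
      (fun s => PySem.Set.add s tid)).keys = PySem.Set.add d.keys x := by
  rw [PySem.Dict.keys_modify,
      PySem.Dict.keys_insert_of_contains _ _ (by simp [PySem.Dict.contains_setdefault]),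
      PySem.Dict.keys_setdefault]
  rw [PySem.Dict.contains_eq_decide_mem_keys]
  unfold PySem.Set.add
  by_cases h : x ∈ d.keys <;> simp [h]

theorem pv_step_getD (d : PySem.Dict Int (PySem.Set Int)) (x tid j : Int) :
    ((d.setdefault x PySem.Set.empty).modify x PySem.Set.empty
      (fun s => PySem.Set.add s tid)).getD j PySem.Set.empty
    = if j = x then PySem.Set.add (d.getD x PySem.Set.empty) tid
      else d.getD j PySem.Set.empty := by
  rw [PySem.Dict.getD_modify]
  by_cases h : j = x
  · simp [h, PySem.Dict.getD_setdefault_self]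
  · simp only [h, if_false]
    simp [PySem.Dict.getD, PySem.Dict.get?_setdefault_of_ne _ _ h]

-- the inner loop over one transaction t with transaction id tid
theorem pv_inner_keys (t : List Int) (tid : Int) (d : PySem.Dict Int (PySem.Set Int)) :
    (t.foldl
      (fun (d : PySem.Dict Int (PySem.Set Int)) item =>
        (d.setdefault item PySem.Set.empty).modify item PySem.Set.empty
          (fun s => PySem.Set.add s tid)) d).keys
    = PySem.Set.update d.keys t := by
  induction t generalizing d with
  | nil => simp [PySem.Set.update_nil]
  | cons x t ih =>
      rw [List.foldl_cons, ih, PySem.Set.update_cons, pv_step_keys]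

theorem pv_inner_getD (t : List Int) (tid : Int) (d : PySem.Dict Int (PySem.Set Int)) (j : Int) :
    (t.foldl
      (fun (d : PySem.Dict Int (PySem.Set Int)) item =>
        (d.setdefault item PySem.Set.empty).modify item PySem.Set.empty
          (fun s => PySem.Set.add s tid)) d).getD j PySem.Set.empty
    = if j ∈ t then PySem.Set.add (d.getD j PySem.Set.empty) tid
      else d.getD j PySem.Set.empty := by
  induction t generalizing d with
  | nil => simp
  | cons x t ih =>
      rw [List.foldl_cons, ih, pv_step_getD]
      by_cases hjx : j = x
      · subst hjx
        by_cases hjt : j ∈ t <;> simp [hjt]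
      · by_cases hjt : j ∈ t <;> simp [hjx, hjt, List.mem_cons]

-- the outer loop over the enumerated transactions, generalized over start index and dict
theorem pv_outer (ts : List (List Int)) (s : Int) (d : PySem.Dict Int (PySem.Set Int))
    (hb : ∀ j, ∀ x ∈ d.getD j PySem.Set.empty, x < s) :
    ((PySem.List.enumerate ts s).foldl
      (fun d p =>
        p.2.foldl
          (fun (d : PySem.Dict Int (PySem.Set Int)) item =>
            (d.setdefault item PySem.Set.empty).modify item PySem.Set.empty
              (fun s => PySem.Set.add s p.1)) d) d).keys
      = PySem.Set.update d.keys ts.flatten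
    ∧ ∀ j, ((PySem.List.enumerate ts s).foldl
      (fun d p =>
        p.2.foldl
          (fun (d : PySem.Dict Int (PySem.Set Int)) item =>
            (d.setdefault item PySem.Set.empty).modify item PySem.Set.empty
              (fun s => PySem.Set.add s p.1)) d) d).getD j PySem.Set.empty
      = d.getD j PySem.Set.empty
        ++ ((PySem.List.enumerate ts s).filter (fun p => p.2.contains j)).map (·.1) := by
  induction ts generalizing s d with
  | nil => simp [PySem.List.enumerate_nil, PySem.Set.update_nil]
  | cons t ts ih =>
      rw [PySem.List.enumerate_cons]
      set d1 := t.foldl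
        (fun (d : PySem.Dict Int (PySem.Set Int)) item =>
          (d.setdefault item PySem.Set.empty).modify item PySem.Set.empty
            (fun v => PySem.Set.add v s)) d with hd1
      have hgd1 : ∀ j, d1.getD j PySem.Set.empty
          = if j ∈ t then PySem.Set.add (d.getD j PySem.Set.empty) s
            else d.getD j PySem.Set.empty := fun j => pv_inner_getD t s d j
      have hb1 : ∀ j, ∀ x ∈ d1.getD j PySem.Set.empty, x < s + 1 := by
        intro j x hx
        rw [hgd1 j] at hx
        by_cases hj : j ∈ t
        · simp only [hj, if_true] at hx
          rcases (PySem.Set.mem_add _ _ _).mp hx with h | h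
          · exact lt_trans (hb j x h) (by omega)
          · omega
        · simp only [hj, if_false] at hx
          exact lt_trans (hb j x hx) (by omega)
      obtain ⟨ihk, ihg⟩ := ih (s + 1) d1 hb1
      constructor
      · rw [List.foldl_cons]
        show _ = PySem.Set.update d.keys (t ++ ts.flatten)
        rw [PySem.Set.update_append, ← pv_inner_keys t s d]
        exact ihk
      · intro j
        rw [List.foldl_cons, ihg j, hgd1 j, List.filter_cons]
        by_cases hj : j ∈ t
        · have hc : t.contains j = true := by simpa using hj
          have hs : s ∉ d.getD j PySem.Set.empty := fun h => absurd (hb j s h) (by omega)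
          simp only [hj, if_true, hc]
          rw [PySem.Set.add_of_not_mem hs]
          simp
        · have hc : t.contains j = false := by simpa using hj
          simp [hj]

-- the filtered tid list is Nodup (tids in an enumeration are strictly increasing)
theorem pv_tids_nodup (ts : List (List Int)) (s : Int) (j : Int) :
    (((PySem.List.enumerate ts s).filter (fun p => p.2.contains j)).map (·.1)).Nodup := by
  have h := (PySem.List.pairwise_lt_enumerate ts s).filter (fun p => p.2.contains j)
  exact List.Pairwise.map (S := fun a b => (a : Int) ≠ b)
    (fun p : Int × List Int => p.1) (fun a b hab => ne_of_lt hab) h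

-- ===== VERDICT (by name: the statement is the Claim_ definition above) =====
theorem build_tidlists_spec : Claim_equal_build_tidlists := by
  intro ts _
  unfold Spec_build_tidlists build_tidlists build_tidlists_alt
  obtain ⟨hk, hg⟩ := pv_outer ts 0 PySem.Dict.empty
    (by intro j x hx; simp [PySem.Dict.empty, PySem.Dict.getD, PySem.Dict.get?] at hx)
  have hke : (PySem.Dict.empty : PySem.Dict Int (PySem.Set Int)).keys = [] := rfl
  rw [hke, PySem.Set.update_nil_left] at hk
  have hnd : (((PySem.List.enumerate ts 0).foldl
      (fun d p =>
        p.2.foldl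
          (fun (d : PySem.Dict Int (PySem.Set Int)) item =>
            (d.setdefault item PySem.Set.empty).modify item PySem.Set.empty
              (fun s => PySem.Set.add s p.1)) d) PySem.Dict.empty)).keys.Nodup := by
    rw [hk]; exact PySem.Set.nodup_ofList _
  rw [PySem.Dict.items_eq_map_keys _ hnd PySem.Set.empty, hk,
      PySem.List.dedup_eq_ofList]
  apply List.map_congr_left
  intro k _
  have := hg k
  have hge : (PySem.Dict.empty : PySem.Dict Int (PySem.Set Int)).getD k PySem.Set.empty = [] := rfl
  rw [hge] at this
  rw [this, List.nil_append,
      PySem.Set.ofList_eq_self_of_nodup _ (pv_tids_nodup ts 0 k)]
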